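-- pv_equiv track=rewrite | github.com/mathelai/github.io | imo2016p2/simulation.py | check_diagonal_constraints
-- ===== SOURCE A (Python) =====
-- from typing import List, Dict, Tuple, Optional
--
-- def get_diagonals_type1(n: int) -> List[List[Tuple[int, int]]]:
--     """
--     Get all diagonals of type 1 (where i-j is constant).
--
--     Args:
--         n: Size of the grid
--
--     Returns:
--         List of diagonals, where each diagonal is a list of (i,j) coordinates
--     """
--     diagonals = []
--     # i-j ranges from -(n-1) to (n-1)
--     for diff in range(-(n-1), n):
--         diagonal = []
--         for i in range(n):
--             j = i - diff
--             if 0 <= j < n: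
--                 diagonal.append((i, j))
--         if diagonal:
--             diagonals.append(diagonal)
--     return diagonals
--
-- def get_diagonals_type2(n: int) -> List[List[Tuple[int, int]]]:
--     """
--     Get all diagonals of type 2 (where i+j is constant).
--
--     Args:
--         n: Size of the grid
--
--     Returns:
--         List of diagonals, where each diagonal is a list of (i,j) coordinates
--     """
--     diagonals = []
--     # i+j ranges from 0 to 2(n-1)
--     for total in range(2*n - 1):
--         diagonal = []
--         for i in range(n):
--             j = total - i
--             if 0 <= j < n:
--                 diagonal.append((i, j))
--         if diagonal:
--             diagonals.append(diagonal)
--     return diagonals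
--
-- def check_diagonal_constraints(grid: List[List[str]], n: int) -> bool:
--     """
--     Check if all diagonals with length divisible by 3 have exactly length/3 of each letter.
--
--     Args:
--         grid: The n×n grid
--         n: Size of the grid
--
--     Returns:
--         True if diagonal constraints are satisfied
--     """
--     # Check type 1 diagonals
--     for diagonal in get_diagonals_type1(n):
--         if len(diagonal) % 3 == 0:
--             counts = {'A': 0, 'B': 0, 'C': 0}
--             for i, j in diagonal:
--                 if grid[i][j] in counts:
--                     counts[grid[i][j]] += 1
--             target = len(diagonal) // 3
--             if counts['A'] != target or counts['B'] != target or counts['C'] != target: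
--                 return False
--
--     # Check type 2 diagonals
--     for diagonal in get_diagonals_type2(n):
--         if len(diagonal) % 3 == 0:
--             counts = {'A': 0, 'B': 0, 'C': 0}
--             for i, j in diagonal:
--                 if grid[i][j] in counts:
--                     counts[grid[i][j]] += 1
--             target = len(diagonal) // 3
--             if counts['A'] != target or counts['B'] != target or counts['C'] != target:
--                 return False
--
--     return True
-- ===== SOURCE B (Python) =====
-- def check_diagonal_constraints(grid, n):
--     # One pass over the cells: count each letter per diagonal key (i-j / i+j),
--     # then check every diagonal using its closed-form length n - |key offset|.
--     diag1 = {}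
--     diag2 = {}
--     for i in range(n):
--         for j in range(n):
--             ch = grid[i][j]
--             if ch in ('A', 'B', 'C'):
--                 diag1[(i - j, ch)] = diag1.get((i - j, ch), 0) + 1
--                 diag2[(i + j, ch)] = diag2.get((i + j, ch), 0) + 1
--     for d in range(-(n - 1), n):
--         length = n - abs(d)
--         if length % 3 == 0:
--             t = length // 3
--             for ch in ('A', 'B', 'C'):
--                 if diag1.get((d, ch), 0) != t:
--                     return False
--     for s in range(2 * n - 1):
--         length = n - abs(s - (n - 1))
--         if length % 3 == 0:
--             t = length // 3
--             for ch in ('A', 'B', 'C'):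
--                 if diag2.get((s, ch), 0) != t:
--                     return False
--     return True
-- ===== Notes on version B (the rewrite author's own statement) =====
-- stated objective: alternative
-- what changed: Instead of A's explicit construction of coordinate lists for every diagonal (two generator passes) followed by a fresh counting dict per diagonal, B makes one pass over the grid cells accumulating letter counts in two dicts keyed by (i-j, letter) and (i+j, letter), then checks each diagonal using its closed-form length n - |offset|.
-- outside the precondition, e.g. on check_diagonal_constraints([], 1): A returns True, B raises IndexError
import Mathlib
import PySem

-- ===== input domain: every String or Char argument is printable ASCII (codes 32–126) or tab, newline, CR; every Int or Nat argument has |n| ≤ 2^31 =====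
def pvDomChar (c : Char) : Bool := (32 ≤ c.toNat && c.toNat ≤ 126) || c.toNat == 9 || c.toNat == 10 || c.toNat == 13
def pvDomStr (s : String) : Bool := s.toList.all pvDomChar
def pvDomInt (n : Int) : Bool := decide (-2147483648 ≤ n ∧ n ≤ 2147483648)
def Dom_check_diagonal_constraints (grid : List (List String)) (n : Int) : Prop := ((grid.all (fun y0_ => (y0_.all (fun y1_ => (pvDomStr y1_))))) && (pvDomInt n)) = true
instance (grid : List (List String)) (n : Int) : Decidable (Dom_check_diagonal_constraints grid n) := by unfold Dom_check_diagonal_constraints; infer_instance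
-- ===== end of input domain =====

-- B replaces A's per-diagonal coordinate-list construction and per-diagonal counting dicts by a
-- single pass over the grid cells into two dicts keyed by (i-j, letter) / (i+j, letter), checking
-- each diagonal afterwards with its closed-form length n - |offset| (objective: alternative).

-- shared helper: grid[i][j] (both Pythons index the grid exactly like this; in range under Pre_)
def pvCell (grid : List (List String)) (i j : Int) : String :=
  PySem.List.pyGetD (PySem.List.pyGetD grid i []) j ""

-- ===== PORT A =====
def pvDiagFold1 (n diff : Int) : List (Int × Int) :=
  (PySem.List.pyRange 0 n 1).foldl (fun dg i =>
    let j := i - diff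
    if 0 ≤ j ∧ j < n then dg ++ [(i, j)] else dg) []

def get_diagonals_type1 (n : Int) : List (List (Int × Int)) :=
  (PySem.List.pyRange (-(n-1)) n 1).foldl (fun ds diff =>
    let diagonal := pvDiagFold1 n diff
    if diagonal ≠ [] then ds ++ [diagonal] else ds) []

def pvDiagFold2 (n total : Int) : List (Int × Int) :=
  (PySem.List.pyRange 0 n 1).foldl (fun dg i =>
    let j := total - i
    if 0 ≤ j ∧ j < n then dg ++ [(i, j)] else dg) []

def get_diagonals_type2 (n : Int) : List (List (Int × Int)) :=
  (PySem.List.pyRange 0 (2*n - 1) 1).foldl (fun ds total =>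
    let diagonal := pvDiagFold2 n total
    if diagonal ≠ [] then ds ++ [diagonal] else ds) []

def pvCountsA (grid : List (List String)) (diag : List (Int × Int)) : PySem.Dict String Int :=
  diag.foldl (fun c p =>
    let ch := pvCell grid p.1 p.2
    if c.contains ch then c.modify ch 0 (· + 1) else c)
    (PySem.Dict.ofList [("A", 0), ("B", 0), ("C", 0)])

def pvCheckDiagA (grid : List (List String)) (diag : List (Int × Int)) : Bool :=
  if PySem.Int.mod (diag.length : Int) 3 == 0 then
    let counts := pvCountsA grid diag
    let target := PySem.Int.floordiv (diag.length : Int) 3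
    if counts.getD "A" 0 ≠ target ∨ counts.getD "B" 0 ≠ target ∨ counts.getD "C" 0 ≠ target
    then false else true
  else true

def check_diagonal_constraints (grid : List (List String)) (n : Int) : Bool :=
  (get_diagonals_type1 n).all (fun diagonal => pvCheckDiagA grid diagonal) &&
  (get_diagonals_type2 n).all (fun diagonal => pvCheckDiagA grid diagonal)

-- ===== PORT B =====
def pvChOK (ch : String) : Bool := ch == "A" || ch == "B" || ch == "C"

-- the single pass over the cells: both tally dicts are carried through one nested loop
def pvTally (grid : List (List String)) (n : Int) :
    PySem.Dict (Int × String) Int × PySem.Dict (Int × String) Int :=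
  (PySem.List.pyRange 0 n 1).foldl (fun cs i =>
    (PySem.List.pyRange 0 n 1).foldl (fun cs j =>
      let ch := pvCell grid i j
      if pvChOK ch then
        (cs.1.insert (i - j, ch) (cs.1.getD (i - j, ch) 0 + 1),
         cs.2.insert (i + j, ch) (cs.2.getD (i + j, ch) 0 + 1))
      else cs) cs)
    (PySem.Dict.empty, PySem.Dict.empty)

def pvCheckKeyB (d : PySem.Dict (Int × String) Int) (key L : Int) : Bool :=
  if PySem.Int.mod L 3 == 0 then
    let t := PySem.Int.floordiv L 3
    ["A", "B", "C"].all (fun ch => d.getD (key, ch) 0 == t)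
  else true

def check_diagonal_constraints_alt (grid : List (List String)) (n : Int) : Bool :=
  let cs := pvTally grid n
  ((PySem.List.pyRange (-(n-1)) n 1).all (fun d => pvCheckKeyB cs.1 d (n - |d|))) &&
  ((PySem.List.pyRange 0 (2*n - 1) 1).all (fun s => pvCheckKeyB cs.2 s (n - |s - (n-1)|)))

-- ===== PRECONDITION & SPEC =====
-- Pre_ asks for the full n×n grid to be present. A only reads the cells lying on diagonals whose
-- length is divisible by 3 (no cell at all when n < 3), while B scans every cell of the n×n grid,
-- so on grids missing only unread cells A returns a value while B raises IndexError.
def Pre_check_diagonal_constraints (grid : List (List String)) (n : Int) : Prop :=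
  n ≤ (grid.length : Int) ∧ ∀ row ∈ grid.take n.toNat, n ≤ (row.length : Int)
instance (grid : List (List String)) (n : Int) : Decidable (Pre_check_diagonal_constraints grid n) := by
  unfold Pre_check_diagonal_constraints; infer_instance

def pvWitness_check_diagonal_constraints : List (List String) × Int :=
  ([["A", "B", "C"], ["B", "C", "A"], ["C", "A", "B"]], 3)

def Spec_check_diagonal_constraints (grid : List (List String)) (n : Int) (out : Bool) : Prop := out = check_diagonal_constraints_alt grid n
instance (grid : List (List String)) (n : Int) (out : Bool) : Decidable (Spec_check_diagonal_constraints grid n out) := by unfold Spec_check_diagonal_constraints; infer_instance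

-- ===== CLAIM (what is proved, stated in full; the proofs are below) =====
def Claim_equal_check_diagonal_constraints : Prop := ∀ (grid : List (List String)) (n : Int), Dom_check_diagonal_constraints grid n → Pre_check_diagonal_constraints grid n → Spec_check_diagonal_constraints grid n (check_diagonal_constraints grid n)

-- ===== LEMMAS AND PROOFS =====

-- generic: `l.all` only depends on the values on members
theorem pv_all_congr {α : Type} (l : List α) (f g : α → Bool)
    (h : ∀ x ∈ l, f x = g x) : l.all f = l.all g := by
  induction l with
  | nil => rfl
  | cons x t ih => simp only [List.all_cons, h x (by simp), ih (fun y hy => h y (by simp [hy]))]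

-- how many members of range(a, b) lie in the interval [c, e)
theorem pv_countP_range_interval_aux (m : Nat) : ∀ (a b c e : Int), (b - a).toNat = m →
    ((PySem.List.pyRange a b 1).countP (fun i => decide (c ≤ i) && decide (i < e)) : Int)
      = max 0 (min b e - max a c) := by
  induction m with
  | zero =>
    intro a b c e hm
    rw [PySem.List.pyRange_one_eq_nil (by omega)]
    simp only [List.countP_nil]
    push_cast
    omega
  | succ k ih =>
    intro a b c e hm
    rw [PySem.List.pyRange_one_cons (by omega), List.countP_cons]
    have hrec := ih (a + 1) b c e (by omega)
    by_cases h1 : (decide (c ≤ a) && decide (a < e)) = true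
    · rw [if_pos h1]
      simp only [Bool.and_eq_true, decide_eq_true_eq] at h1
      push_cast at hrec ⊢
      omega
    · rw [if_neg h1]
      have h1' : ¬ (c ≤ a ∧ a < e) := by simpa using h1
      push_cast at hrec ⊢
      omega

theorem pv_countP_range_interval (a b c e : Int) :
    ((PySem.List.pyRange a b 1).countP (fun i => decide (c ≤ i) && decide (i < e)) : Int)
      = max 0 (min b e - max a c) :=
  pv_countP_range_interval_aux (b - a).toNat a b c e rfl

-- `countP` only depends on the predicate's values on members
theorem pv_countP_congr {α : Type} (l : List α) (p q : α → Bool)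
    (h : ∀ x ∈ l, p x = q x) : l.countP p = l.countP q := by
  induction l with
  | nil => rfl
  | cons x t ih =>
    rw [List.countP_cons, List.countP_cons, h x (by simp),
        ih (fun y hy => h y (by simp [hy]))]

-- counting a predicate that pins the element to one value, over a Nodup list
theorem pv_countP_pin (v : Int) (p : Int → Bool) : ∀ (l : List Int), l.Nodup →
    l.countP (fun j => decide (j = v) && p j) = if v ∈ l ∧ p v = true then 1 else 0 := by
  intro l
  induction l with
  | nil => simp
  | cons x t ih =>
    intro hnd
    rcases List.nodup_cons.mp hnd with ⟨hx, hnd'⟩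
    rw [List.countP_cons, ih hnd']
    by_cases hxv : x = v
    · subst hxv
      have hnv : ¬ (x ∈ t ∧ p x = true) := fun h => hx h.1
      rw [if_neg hnv]
      by_cases hp : p x = true <;> simp [hp]
    · have hb : (decide (x = v) && p x) = false := by simp [hxv]
      rw [hb]
      have hmem : (v ∈ x :: t ∧ p v = true) ↔ (v ∈ t ∧ p v = true) := by
        constructor
        · rintro ⟨hm, hp⟩
          exact ⟨(List.mem_cons.mp hm).resolve_left (fun e => hxv e.symm), hp⟩
        · rintro ⟨hm, hp⟩
          exact ⟨List.mem_cons_of_mem _ hm, hp⟩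
      rw [if_congr hmem rfl rfl]
      simp

-- generic dict-fold: a step that adds an indicator to the value at q turns the fold into a countP
theorem pv_getD_foldl_indicator {κ : Type} [BEq κ] [LawfulBEq κ]
    (g : PySem.Dict κ Int → Int → PySem.Dict κ Int) (q : κ) (p : Int → Bool)
    (hg : ∀ d i, (g d i).getD q 0 = d.getD q 0 + (if p i then 1 else 0)) :
    ∀ (l : List Int) (d : PySem.Dict κ Int),
      (l.foldl g d).getD q 0 = d.getD q 0 + (l.countP p : Int) := by
  intro l
  induction l with
  | nil => simp
  | cons x t ih =>
    intro d
    rw [List.foldl_cons, ih, hg, List.countP_cons]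
    by_cases hp : p x = true <;> simp [hp] <;> ring

-- one cell-step of B's tally, seen at a fixed lookup key q
theorem pv_tally_step_getD (d : PySem.Dict (Int × String) Int) (k : Int) (ch : String)
    (q : Int × String) :
    ((if pvChOK ch then d.insert (k, ch) (d.getD (k, ch) 0 + 1) else d).getD q 0)
      = d.getD q 0 + (if pvChOK ch && decide ((k, ch) = q) then 1 else 0) := by
  by_cases hok : pvChOK ch = true
  · simp only [hok, if_true, Bool.true_and]
    rw [PySem.Dict.getD_insert]
    by_cases hq : q = (k, ch)
    · subst hq; simp
    · have : ¬ ((k, ch) = q) := fun h => hq h.symm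
      simp [hq, this]
  · simp [hok]

-- a pair-state fold whose step acts componentwise is a pair of folds
theorem pv_foldl_pair {α D E : Type} (l : List α) (f : D → α → D) (g : E → α → E)
    (step : D × E → α → D × E) (hstep : ∀ cs x, step cs x = (f cs.1 x, g cs.2 x)) :
    ∀ st : D × E, l.foldl step st = (l.foldl f st.1, l.foldl g st.2) := by
  induction l with
  | nil => intro st; rfl
  | cons x t ih => intro st; rw [List.foldl_cons, hstep, ih]; rfl

-- B's tally splits into two independent single-dict folds
theorem pv_tally_eq (grid : List (List String)) (n : Int) :
    pvTally grid n =
      ((PySem.List.pyRange 0 n 1).foldl (fun d1 i =>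
        (PySem.List.pyRange 0 n 1).foldl (fun d1 j =>
          let ch := pvCell grid i j
          if pvChOK ch then d1.insert (i - j, ch) (d1.getD (i - j, ch) 0 + 1) else d1) d1)
        PySem.Dict.empty,
       (PySem.List.pyRange 0 n 1).foldl (fun d2 i =>
        (PySem.List.pyRange 0 n 1).foldl (fun d2 j =>
          let ch := pvCell grid i j
          if pvChOK ch then d2.insert (i + j, ch) (d2.getD (i + j, ch) 0 + 1) else d2) d2)
        PySem.Dict.empty) := by
  unfold pvTally
  refine pv_foldl_pair _ _ _ _ ?_ _
  intro cs i
  refine pv_foldl_pair _ _ _ _ ?_ _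
  intro cs' j
  by_cases hok : pvChOK (pvCell grid i j) = true <;> simp [hok]

-- the count B stores at (k, X) is the number of cells of that diagonal carrying letter X
theorem pv_tally1_getD (grid : List (List String)) (n k : Int) (X : String)
    (hX : X = "A" ∨ X = "B" ∨ X = "C") :
    ((pvTally grid n).1.getD (k, X) 0)
      = ((PySem.List.pyRange 0 n 1).countP (fun i =>
          decide (0 ≤ i - k) && decide (i - k < n) && decide (pvCell grid i (i - k) = X)) : Int) := by
  have hchX : pvChOK X = true := by rcases hX with h | h | h <;> simp [h, pvChOK]
  rw [pv_tally_eq]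
  have hinner : ∀ (d : PySem.Dict (Int × String) Int) (i : Int),
      ((PySem.List.pyRange 0 n 1).foldl (fun d1 j =>
        let ch := pvCell grid i j
        if pvChOK ch then d1.insert (i - j, ch) (d1.getD (i - j, ch) 0 + 1) else d1) d).getD (k, X) 0
      = d.getD (k, X) 0 + (if (decide (0 ≤ i - k) && decide (i - k < n)
            && decide (pvCell grid i (i - k) = X)) = true then 1 else 0) := by
    intro d i
    rw [pv_getD_foldl_indicator _ (k, X)
        (fun j => pvChOK (pvCell grid i j) && decide ((i - j, pvCell grid i j) = (k, X)))
        (fun d' j => pv_tally_step_getD d' (i - j) (pvCell grid i j) (k, X)) _ d]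
    have hP : ∀ j ∈ PySem.List.pyRange 0 n 1,
        (pvChOK (pvCell grid i j) && decide ((i - j, pvCell grid i j) = ((k : Int), X)))
          = (decide (j = i - k) && decide (pvCell grid i j = X)) := by
      intro j _
      by_cases h1 : j = i - k
      · subst h1
        have hk : i - (i - k) = k := by ring
        by_cases h2 : pvCell grid i (i - k) = X
        · simp [h2, hchX, hk]
        · simp [h2, Prod.ext_iff]
      · have hik : ¬ (i - j = k) := by omega
        simp [h1, hik, Prod.ext_iff]
    rw [pv_countP_congr _ _ _ hP,
        pv_countP_pin (i - k) (fun j => decide (pvCell grid i j = X)) _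
          (PySem.List.nodup_pyRange_one 0 n)]
    by_cases h1 : 0 ≤ i - k <;> by_cases h2 : i - k < n <;>
      by_cases h3 : pvCell grid i (i - k) = X <;>
        simp [h1, h2, h3, PySem.List.mem_pyRange_one, and_comm]
  rw [pv_getD_foldl_indicator _ (k, X)
      (fun i => decide (0 ≤ i - k) && decide (i - k < n) && decide (pvCell grid i (i - k) = X))
      hinner _ PySem.Dict.empty]
  simp

theorem pv_tally2_getD (grid : List (List String)) (n s : Int) (X : String)
    (hX : X = "A" ∨ X = "B" ∨ X = "C") :
    ((pvTally grid n).2.getD (s, X) 0)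
      = ((PySem.List.pyRange 0 n 1).countP (fun i =>
          decide (0 ≤ s - i) && decide (s - i < n) && decide (pvCell grid i (s - i) = X)) : Int) := by
  have hchX : pvChOK X = true := by rcases hX with h | h | h <;> simp [h, pvChOK]
  rw [pv_tally_eq]
  have hinner : ∀ (d : PySem.Dict (Int × String) Int) (i : Int),
      ((PySem.List.pyRange 0 n 1).foldl (fun d2 j =>
        let ch := pvCell grid i j
        if pvChOK ch then d2.insert (i + j, ch) (d2.getD (i + j, ch) 0 + 1) else d2) d).getD (s, X) 0
      = d.getD (s, X) 0 + (if (decide (0 ≤ s - i) && decide (s - i < n)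
            && decide (pvCell grid i (s - i) = X)) = true then 1 else 0) := by
    intro d i
    rw [pv_getD_foldl_indicator _ (s, X)
        (fun j => pvChOK (pvCell grid i j) && decide ((i + j, pvCell grid i j) = (s, X)))
        (fun d' j => pv_tally_step_getD d' (i + j) (pvCell grid i j) (s, X)) _ d]
    have hP : ∀ j ∈ PySem.List.pyRange 0 n 1,
        (pvChOK (pvCell grid i j) && decide ((i + j, pvCell grid i j) = ((s : Int), X)))
          = (decide (j = s - i) && decide (pvCell grid i j = X)) := by
      intro j _
      by_cases h1 : j = s - i
      · subst h1
        have hk : i + (s - i) = s := by ring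
        by_cases h2 : pvCell grid i (s - i) = X
        · simp [h2, hchX, hk]
        · simp [h2, Prod.ext_iff]
      · have hik : ¬ (i + j = s) := by omega
        simp [h1, hik, Prod.ext_iff]
    rw [pv_countP_congr _ _ _ hP,
        pv_countP_pin (s - i) (fun j => decide (pvCell grid i j = X)) _
          (PySem.List.nodup_pyRange_one 0 n)]
    by_cases h1 : 0 ≤ s - i <;> by_cases h2 : s - i < n <;>
      by_cases h3 : pvCell grid i (s - i) = X <;>
        simp [h1, h2, h3, PySem.List.mem_pyRange_one, and_comm]
  rw [pv_getD_foldl_indicator _ (s, X)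
      (fun i => decide (0 ≤ s - i) && decide (s - i < n) && decide (pvCell grid i (s - i) = X))
      hinner _ PySem.Dict.empty]
  simp

-- A's inner fold builds the filtered diagonal explicitly
theorem pv_diagFold1_eq (n diff : Int) :
    pvDiagFold1 n diff =
      ((PySem.List.pyRange 0 n 1).filter (fun i =>
        decide (0 ≤ i - diff) && decide (i - diff < n))).map (fun i => (i, i - diff)) := by
  unfold pvDiagFold1
  rw [PySem.List.foldl_append_ite (p := fun i => 0 ≤ i - diff ∧ i - diff < n)
      (f := fun i => (i, i - diff))]
  simp [Bool.decide_and]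

theorem pv_diagFold2_eq (n total : Int) :
    pvDiagFold2 n total =
      ((PySem.List.pyRange 0 n 1).filter (fun i =>
        decide (0 ≤ total - i) && decide (total - i < n))).map (fun i => (i, total - i)) := by
  unfold pvDiagFold2
  rw [PySem.List.foldl_append_ite (p := fun i => 0 ≤ total - i ∧ total - i < n)
      (f := fun i => (i, total - i))]
  simp [Bool.decide_and]

-- A's per-diagonal counting dict, read at letter X, is a plain count
theorem pv_countsA_fold (grid : List (List String)) :
    ∀ (l : List (Int × Int)) (c : PySem.Dict String Int) (X : String), c.contains X = true →
      ((l.foldl (fun c p =>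
          let ch := pvCell grid p.1 p.2
          if c.contains ch then c.modify ch 0 (· + 1) else c) c).getD X 0)
        = c.getD X 0 + (l.countP (fun p => decide (pvCell grid p.1 p.2 = X)) : Int) := by
  intro l
  induction l with
  | nil => intro c X _; simp
  | cons p t ih =>
    intro c X hX
    rw [List.foldl_cons, List.countP_cons]
    by_cases hc : c.contains (pvCell grid p.1 p.2) = true
    · have hX' : (c.modify (pvCell grid p.1 p.2) 0 (· + 1)).contains X = true := by
        rw [PySem.Dict.contains_modify]; simp [hX]
      rw [show (let ch := pvCell grid p.1 p.2
            if c.contains ch then c.modify ch 0 (· + 1) else c)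
          = c.modify (pvCell grid p.1 p.2) 0 (· + 1) from if_pos hc]
      rw [ih _ X hX', PySem.Dict.getD_modify]
      by_cases hq : X = pvCell grid p.1 p.2
      · rw [if_pos hq]
        have hd : decide (pvCell grid p.1 p.2 = X) = true := decide_eq_true hq.symm
        rw [hd, if_pos rfl, hq]
        push_cast
        ring
      · rw [if_neg hq]
        have hd : decide (pvCell grid p.1 p.2 = X) = false :=
          decide_eq_false (fun h => hq h.symm)
        rw [hd]
        push_cast
        ring
    · rw [show (let ch := pvCell grid p.1 p.2
            if c.contains ch then c.modify ch 0 (· + 1) else c) = c from if_neg hc]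
      rw [ih _ X hX]
      have hd : decide (pvCell grid p.1 p.2 = X) = false :=
        decide_eq_false (fun h => hc (by rw [h]; exact hX))
      rw [hd]
      push_cast
      ring

theorem pv_countsA_getD (grid : List (List String)) (diag : List (Int × Int)) (X : String)
    (hX : X = "A" ∨ X = "B" ∨ X = "C") :
    (pvCountsA grid diag).getD X 0
      = (diag.countP (fun p => decide (pvCell grid p.1 p.2 = X)) : Int) := by
  unfold pvCountsA
  have hcont : (PySem.Dict.ofList [("A", (0:Int)), ("B", 0), ("C", 0)]).contains X = true := by
    rcases hX with h | h | h <;> subst h <;> decide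
  rw [pv_countsA_fold grid diag _ X hcont]
  have h0 : (PySem.Dict.ofList [("A", (0:Int)), ("B", 0), ("C", 0)]).getD X 0 = 0 := by
    rcases hX with h | h | h <;> subst h <;> decide
  rw [h0, zero_add]

-- diagonal lengths in closed form
theorem pv_diagFold1_length (n diff : Int) (h1 : -(n-1) ≤ diff) (h2 : diff < n) :
    ((pvDiagFold1 n diff).length : Int) = n - |diff| := by
  rw [pv_diagFold1_eq, List.length_map, ← List.countP_eq_length_filter]
  have hc : ((PySem.List.pyRange 0 n 1).countP (fun i =>
      decide (0 ≤ i - diff) && decide (i - diff < n)) : Int)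
      = max 0 (min n (n + diff) - max 0 diff) := by
    rw [pv_countP_congr _ _ (fun i => decide (diff ≤ i) && decide (i < n + diff))
        (fun i _ => by
          congr 1
          · exact decide_eq_decide.mpr (by omega)
          · exact decide_eq_decide.mpr (by omega))]
    exact pv_countP_range_interval 0 n diff (n + diff)
  rw [hc]
  rcases abs_cases diff with ⟨ha, _⟩ | ⟨ha, _⟩ <;> omega

theorem pv_diagFold2_length (n total : Int) (h1 : 0 ≤ total) (h2 : total < 2*n - 1) :
    ((pvDiagFold2 n total).length : Int) = n - |total - (n-1)| := by
  rw [pv_diagFold2_eq, List.length_map, ← List.countP_eq_length_filter]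
  have hc : ((PySem.List.pyRange 0 n 1).countP (fun i =>
      decide (0 ≤ total - i) && decide (total - i < n)) : Int)
      = max 0 (min n (total + 1) - max 0 (total - n + 1)) := by
    rw [pv_countP_congr _ _ (fun i => decide (total - n + 1 ≤ i) && decide (i < total + 1))
        (fun i _ => by
          rw [Bool.and_comm]
          congr 1
          · exact decide_eq_decide.mpr (by omega)
          · exact decide_eq_decide.mpr (by omega))]
    exact pv_countP_range_interval 0 n (total - n + 1) (total + 1)
  rw [hc]
  rcases abs_cases (total - (n-1)) with ⟨ha, _⟩ | ⟨ha, _⟩ <;> omega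

-- the two per-diagonal letter counts agree (type 1)
theorem pv_counts1_eq (grid : List (List String)) (n diff : Int) (X : String)
    (hX : X = "A" ∨ X = "B" ∨ X = "C") :
    (pvCountsA grid (pvDiagFold1 n diff)).getD X 0 = (pvTally grid n).1.getD (diff, X) 0 := by
  rw [pv_countsA_getD grid _ X hX, pv_tally1_getD grid n diff X hX]
  congr 1
  rw [pv_diagFold1_eq, List.countP_map, List.countP_filter]
  refine pv_countP_congr _ _ _ (fun i _ => ?_)
  simp only [Function.comp]
  by_cases h1 : 0 ≤ i - diff <;> by_cases h2 : i - diff < n <;>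
    by_cases h3 : pvCell grid i (i - diff) = X <;> simp [h1, h2, h3]

theorem pv_counts2_eq (grid : List (List String)) (n total : Int) (X : String)
    (hX : X = "A" ∨ X = "B" ∨ X = "C") :
    (pvCountsA grid (pvDiagFold2 n total)).getD X 0 = (pvTally grid n).2.getD (total, X) 0 := by
  rw [pv_countsA_getD grid _ X hX, pv_tally2_getD grid n total X hX]
  congr 1
  rw [pv_diagFold2_eq, List.countP_map, List.countP_filter]
  refine pv_countP_congr _ _ _ (fun i _ => ?_)
  simp only [Function.comp]
  by_cases h1 : 0 ≤ total - i <;> by_cases h2 : total - i < n <;>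
    by_cases h3 : pvCell grid i (total - i) = X <;> simp [h1, h2, h3]

-- the two final tests on one diagonal are the same Bool
theorem pv_triple_check (x y z t : Int) :
    (if x ≠ t ∨ y ≠ t ∨ z ≠ t then false else true)
      = ((x == t) && ((y == t) && ((z == t) && true))) := by
  by_cases hA : x = t <;> by_cases hB : y = t <;> by_cases hC : z = t <;> simp [hA, hB, hC]

-- per-diagonal equality of the two checks
theorem pv_check1_eq (grid : List (List String)) (n diff : Int)
    (h1 : -(n-1) ≤ diff) (h2 : diff < n) :
    pvCheckDiagA grid (pvDiagFold1 n diff) = pvCheckKeyB (pvTally grid n).1 diff (n - |diff|) := by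
  unfold pvCheckDiagA pvCheckKeyB
  rw [pv_diagFold1_length n diff h1 h2]
  by_cases hm : (PySem.Int.mod (n - |diff|) 3 == 0) = true
  · rw [if_pos hm, if_pos hm]
    simp only [List.all_cons, List.all_nil]
    rw [pv_counts1_eq grid n diff "A" (by tauto), pv_counts1_eq grid n diff "B" (by tauto),
        pv_counts1_eq grid n diff "C" (by tauto)]
    exact pv_triple_check _ _ _ _
  · rw [if_neg hm, if_neg hm]

theorem pv_check2_eq (grid : List (List String)) (n total : Int)
    (h1 : 0 ≤ total) (h2 : total < 2*n - 1) :
    pvCheckDiagA grid (pvDiagFold2 n total)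
      = pvCheckKeyB (pvTally grid n).2 total (n - |total - (n-1)|) := by
  unfold pvCheckDiagA pvCheckKeyB
  rw [pv_diagFold2_length n total h1 h2]
  by_cases hm : (PySem.Int.mod (n - |total - (n-1)|) 3 == 0) = true
  · rw [if_pos hm, if_pos hm]
    simp only [List.all_cons, List.all_nil]
    rw [pv_counts2_eq grid n total "A" (by tauto), pv_counts2_eq grid n total "B" (by tauto),
        pv_counts2_eq grid n total "C" (by tauto)]
    exact pv_triple_check _ _ _ _
  · rw [if_neg hm, if_neg hm]

-- A's diagonal lists are exactly the per-key diagonals, in range order (none is empty)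
theorem pv_diagonals1_eq (n : Int) :
    get_diagonals_type1 n = (PySem.List.pyRange (-(n-1)) n 1).map (pvDiagFold1 n) := by
  unfold get_diagonals_type1
  rw [PySem.List.foldl_append_ite (p := fun diff => pvDiagFold1 n diff ≠ [])
      (f := fun diff => pvDiagFold1 n diff)]
  rw [List.nil_append, List.filter_eq_self.mpr]
  intro diff hmem
  rw [PySem.List.mem_pyRange_one] at hmem
  have hlen := pv_diagFold1_length n diff hmem.1 hmem.2
  have : (pvDiagFold1 n diff).length ≠ 0 := by
    rcases abs_cases diff with ⟨ha, _⟩ | ⟨ha, _⟩ <;> omega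
  simp only [decide_eq_true_eq]
  exact fun hnil => this (by rw [hnil]; rfl)

theorem pv_diagonals2_eq (n : Int) :
    get_diagonals_type2 n = (PySem.List.pyRange 0 (2*n - 1) 1).map (pvDiagFold2 n) := by
  unfold get_diagonals_type2
  rw [PySem.List.foldl_append_ite (p := fun total => pvDiagFold2 n total ≠ [])
      (f := fun total => pvDiagFold2 n total)]
  rw [List.nil_append, List.filter_eq_self.mpr]
  intro total hmem
  rw [PySem.List.mem_pyRange_one] at hmem
  have hlen := pv_diagFold2_length n total hmem.1 hmem.2
  have : (pvDiagFold2 n total).length ≠ 0 := by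
    rcases abs_cases (total - (n-1)) with ⟨ha, _⟩ | ⟨ha, _⟩ <;> omega
  simp only [decide_eq_true_eq]
  exact fun hnil => this (by rw [hnil]; rfl)

-- ===== VERDICT (by name: the statement is the Claim_ definition above) =====
theorem check_diagonal_constraints_spec : Claim_equal_check_diagonal_constraints := by
  intro grid n _ _
  unfold Spec_check_diagonal_constraints check_diagonal_constraints check_diagonal_constraints_alt
  rw [pv_diagonals1_eq, pv_diagonals2_eq]
  simp only [List.all_map]
  congr 1
  · apply pv_all_congr
    intro diff hmem
    rw [PySem.List.mem_pyRange_one] at hmem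
    exact pv_check1_eq grid n diff hmem.1 hmem.2
  · apply pv_all_congr
    intro total hmem
    rw [PySem.List.mem_pyRange_one] at hmem
    exact pv_check2_eq grid n total hmem.1 hmem.2
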